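-- pv_equiv track=rewrite | github.com/marcelo-torres/green-scheduler | src/scheduling/energy/energy_usage_calculator.py | _calculate
-- ===== SOURCE A (Python) =====
-- TASK_EVENT = 'task'
--
-- G_POWER_EVENT = 'green_power'
--
-- def _calculate(power_events):
--     # Power along iterations
--     green_power = 0
--     requested_power = 0
--
--     # Energy used
--     brown_energy_used = 0
--     green_energy_not_used = 0
--     total_energy = 0
--
--     start_time = 0
--     for time, events in power_events.items():
--
--         # Convert power and duration to energy
--         event_duration = time - start_time
--         green_energy = event_duration * green_power
--         requested_energy = event_duration * requested_power
--
--         if requested_energy > green_energy: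
--             brown_energy_used += requested_energy - green_energy
--
--         elif requested_energy < green_energy:
--             green_energy_not_used += green_energy - requested_energy
--
--         total_energy += requested_energy
--
--         for event_type, power in events:
--             if event_type == G_POWER_EVENT:
--                 green_power = power
--             elif event_type == TASK_EVENT:
--                 requested_power += power
--             else:
--                 raise EventTypeException(f'No eventy type {event_type} defined')
--
--         start_time = time
--
--     return brown_energy_used, green_energy_not_used, total_energy
--
-- class EventTypeException(Exception):
--     def __init__(self, message):
--         super().__init__(message)
-- ===== SOURCE B (Python) =====
-- TASK_EVENT = 'task'
--
-- G_POWER_EVENT = 'green_power'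
--
--
-- class EventTypeException(Exception):
--     def __init__(self, message):
--         super().__init__(message)
--
--
-- def _calculate(power_events):
--     # Pass 1: record one (duration, green_power, requested_power) interval per
--     # timestamp, using the power levels as they stand BEFORE that timestamp's
--     # events, then apply the events.
--     intervals = []
--     green_power = 0
--     requested_power = 0
--     start_time = 0
--     for time, events in power_events.items():
--         intervals.append((time - start_time, green_power, requested_power))
--         for event_type, power in events:
--             if event_type == G_POWER_EVENT:
--                 green_power = power
--             elif event_type == TASK_EVENT:
--                 requested_power += power
--             else:
--                 raise EventTypeException(f'No eventy type {event_type} defined')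
--         start_time = time
--
--     # Pass 2: aggregate the three energy totals from the recorded intervals.
--     brown_energy_used = sum(max(d * (r - g), 0) for d, g, r in intervals)
--     green_energy_not_used = sum(max(d * (g - r), 0) for d, g, r in intervals)
--     total_energy = sum(d * r for d, g, r in intervals)
--     return brown_energy_used, green_energy_not_used, total_energy
-- ===== Notes on version B (the rewrite author's own statement) =====
-- stated objective: alternative
-- what changed: B splits A's single accumulating loop into a first pass that records (duration, green_power, requested_power) intervals and a second pass that sums the three totals via max()-based closed forms instead of A's if/elif accumulator branches.
-- outside the precondition, e.g. on _calculate({1: [('x', 2)]}): A raises EventTypeException, B raises EventTypeException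
import Mathlib
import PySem

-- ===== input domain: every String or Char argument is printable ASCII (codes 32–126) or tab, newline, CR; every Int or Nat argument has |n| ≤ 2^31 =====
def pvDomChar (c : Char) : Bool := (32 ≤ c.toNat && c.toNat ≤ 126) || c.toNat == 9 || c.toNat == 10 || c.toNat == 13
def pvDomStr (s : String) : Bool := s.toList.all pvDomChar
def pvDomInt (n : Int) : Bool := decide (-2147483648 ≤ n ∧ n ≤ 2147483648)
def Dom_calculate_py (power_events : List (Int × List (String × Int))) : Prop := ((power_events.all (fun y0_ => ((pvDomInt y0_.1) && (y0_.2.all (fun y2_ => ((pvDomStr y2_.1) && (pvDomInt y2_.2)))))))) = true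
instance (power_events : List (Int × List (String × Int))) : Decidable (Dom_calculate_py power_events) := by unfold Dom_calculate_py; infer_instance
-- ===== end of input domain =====

-- B records (duration, green, requested) intervals in one pass, then sums the three totals with max()-based closed forms (objective: alternative decomposition, same cost).


-- ===== PORT A =====
-- A's inner event loop over (green_power, requested_power).  The raising branch
-- (unknown event type) is unreachable under Pre_; there the state is left unchanged.
def calcA_events (st : Int × Int) (events : List (String × Int)) : Int × Int :=
  events.foldl (fun s ev =>
    if ev.1 == "green_power" then (ev.2, s.2)
    else if ev.1 == "task" then (s.1, s.2 + ev.2)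
    else s) st

-- A's outer for-loop as structural recursion over the same state
-- (green_power, requested_power, brown, green_not_used, total, start_time)
def calcA_loop : List (Int × List (String × Int)) → Int → Int → Int → Int → Int → Int → Int × Int × Int
  | [], _, _, b, g, tot, _ => (b, g, tot)
  | te :: rest, gp, rp, b, g, tot, st =>
    let event_duration := te.1 - st
    let green_energy := event_duration * gp
    let requested_energy := event_duration * rp
    let b' := if requested_energy > green_energy then b + (requested_energy - green_energy) else b
    let g' := if requested_energy < green_energy then g + (green_energy - requested_energy) else g
    let pw := calcA_events (gp, rp) te.2
    calcA_loop rest pw.1 pw.2 b' g' (tot + requested_energy) te.1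

def calculate_py (power_events : List (Int × List (String × Int))) : Int × Int × Int :=
  calcA_loop power_events 0 0 0 0 0 0

-- ===== PORT B =====
-- B's inner event loop (same Python code shape as in Source B, ported separately).
def calcB_apply (events : List (String × Int)) (st : Int × Int) : Int × Int :=
  events.foldl (fun s ev =>
    if ev.1 == "green_power" then (ev.2, s.2)
    else if ev.1 == "task" then (s.1, s.2 + ev.2)
    else s) st

-- Pass 1: the recorded (duration, green_power, requested_power) intervals
def calcB_intervals : List (Int × List (String × Int)) → Int → Int → Int → List (Int × Int × Int)
  | [], _, _, _ => []
  | te :: rest, gp, rp, st =>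
    let pw := calcB_apply te.2 (gp, rp)
    (te.1 - st, gp, rp) :: calcB_intervals rest pw.1 pw.2 te.1

-- Pass 2: aggregate the three totals
def calculate_py_alt (power_events : List (Int × List (String × Int))) : Int × Int × Int :=
  let intervals := calcB_intervals power_events 0 0 0
  ((intervals.map (fun i => max (i.1 * (i.2.2 - i.2.1)) 0)).sum,
   (intervals.map (fun i => max (i.1 * (i.2.1 - i.2.2)) 0)).sum,
   (intervals.map (fun i => i.1 * i.2.2)).sum)

-- ===== PRECONDITION & SPEC =====
-- Pre_ excludes inputs on which A raises EventTypeException (an event type other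
-- than 'green_power'/'task') and assoc lists with duplicate timestamps, which do
-- not represent any Python dict input.
def Pre_calculate_py (power_events : List (Int × List (String × Int))) : Prop :=
  (power_events.map Prod.fst).Nodup ∧
  ∀ te ∈ power_events, ∀ ev ∈ te.2, ev.1 = "green_power" ∨ ev.1 = "task"
instance (power_events : List (Int × List (String × Int))) : Decidable (Pre_calculate_py power_events) := by unfold Pre_calculate_py; infer_instance

def pvWitness_calculate_py : (List (Int × List (String × Int))) :=
  [(5, [("task", 3)]), (10, [("green_power", 2), ("task", -1)]), (20, [])]

def Spec_calculate_py (power_events : List (Int × List (String × Int))) (out : Int × Int × Int) : Prop := out = calculate_py_alt power_events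
instance (power_events : List (Int × List (String × Int))) (out : Int × Int × Int) : Decidable (Spec_calculate_py power_events out) := by unfold Spec_calculate_py; infer_instance

-- ===== CLAIM (what is proved, stated in full; the proofs are below) =====
def Claim_equal_calculate_py : Prop := ∀ (power_events : List (Int × List (String × Int))), Dom_calculate_py power_events → Pre_calculate_py power_events → Spec_calculate_py power_events (calculate_py power_events)

-- ===== LEMMAS AND PROOFS =====

-- A's loop from an arbitrary state, expressed through B's intervals
theorem calcA_loop_eq (power_events : List (Int × List (String × Int))) :
    ∀ (gp rp b g tot st : Int),
    calcA_loop power_events gp rp b g tot st =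
      (b + ((calcB_intervals power_events gp rp st).map (fun i => max (i.1 * (i.2.2 - i.2.1)) 0)).sum,
       g + ((calcB_intervals power_events gp rp st).map (fun i => max (i.1 * (i.2.1 - i.2.2)) 0)).sum,
       tot + ((calcB_intervals power_events gp rp st).map (fun i => i.1 * i.2.2)).sum) := by
  induction power_events with
  | nil => intro gp rp b g tot st; simp [calcA_loop, calcB_intervals]
  | cons te rest ih =>
    intro gp rp b g tot st
    simp only [calcA_loop, calcB_intervals, calcA_events, calcB_apply, ih,
      List.map_cons, List.sum_cons]
    set d := te.1 - st with hd
    refine Prod.ext ?_ (Prod.ext ?_ ?_) <;> simp only []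
    · by_cases h : d * gp < d * rp
      · rw [if_pos h, max_eq_left (by nlinarith [mul_sub d rp gp])]
        rw [mul_sub]; ring
      · rw [if_neg h, max_eq_right (by nlinarith [mul_sub d rp gp])]; ring
    · by_cases h : d * rp < d * gp
      · rw [if_pos h, max_eq_left (by nlinarith [mul_sub d gp rp])]
        rw [mul_sub]; ring
      · rw [if_neg h, max_eq_right (by nlinarith [mul_sub d gp rp])]; ring
    · ring

-- ===== VERDICT (by name: the statement is the Claim_ definition above) =====
theorem calculate_py_spec : Claim_equal_calculate_py := by
  intro power_events _ _
  unfold Spec_calculate_py calculate_py calculate_py_alt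
  rw [calcA_loop_eq]
  simp
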